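-- pv_equiv track=rewrite | github.com/cmlowerence/qubitgyan-backend | library/api/v2/lexicon/application/use_cases/search_word.py | _merge_source_api
-- ===== SOURCE A (Python) =====
-- from typing import Iterable
--
-- def _merge_source_api(current_source: str, payload_sources: Iterable[str]) -> str:
--     current_source = (current_source or "MANUAL").upper()
--     payload_sources = {s.upper() for s in payload_sources if s}
--
--     if not payload_sources:
--         return current_source
--
--     if current_source in {"MANUAL", "IMPORT"}:
--         return "MIXED" if len(payload_sources) > 1 else next(iter(payload_sources))
--
--     if current_source in payload_sources:
--         return "MIXED" if len(payload_sources) > 1 else current_source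
--
--     return "MIXED"
-- ===== SOURCE B (Python) =====
-- def _merge_source_api(current_source: str, payload_sources) -> str:
--     cur = (current_source or "MANUAL").upper()
--     acc = None if cur in ("MANUAL", "IMPORT") else cur
--     found = False
--     for s in payload_sources:
--         if not s:
--             continue
--         u = s.upper()
--         if acc is None:
--             acc = u
--         elif u != acc:
--             return "MIXED"
--         found = True
--     return acc if found else cur
-- ===== Notes on version B (the rewrite author's own statement) =====
-- stated objective: faster
-- what changed: Replaces A's build-an-uppercased-set-then-three-way-branch logic with a single streaming pass over the payload that keeps one candidate label (seeded with the current source unless it is MANUAL/IMPORT) and early-returns MIXED as soon as a second distinct label is seen; no set is ever built.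
import Mathlib
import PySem

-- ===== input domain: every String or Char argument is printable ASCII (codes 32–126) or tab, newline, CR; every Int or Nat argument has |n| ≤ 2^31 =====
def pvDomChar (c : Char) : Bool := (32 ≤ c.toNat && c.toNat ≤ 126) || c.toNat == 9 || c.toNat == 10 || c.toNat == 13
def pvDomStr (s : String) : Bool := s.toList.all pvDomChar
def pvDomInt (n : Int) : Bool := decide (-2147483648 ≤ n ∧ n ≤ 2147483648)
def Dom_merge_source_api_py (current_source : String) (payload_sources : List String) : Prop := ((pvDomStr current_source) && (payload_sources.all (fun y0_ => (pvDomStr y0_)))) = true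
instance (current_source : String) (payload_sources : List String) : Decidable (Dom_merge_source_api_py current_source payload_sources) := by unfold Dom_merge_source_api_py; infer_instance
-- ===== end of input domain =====

-- B replaces A's build-a-set-then-branch logic with a single streaming pass that keeps one
-- candidate label and returns "MIXED" the moment a second distinct label appears (objective: faster; a timing run measured B faster).

-- ===== PORT A =====
-- 'next(iter(payload_sources))' is only reached when the set is a singleton, where iteration
-- order is irrelevant: ported as headD "".
def merge_source_api_py (current_source : String) (payload_sources : List String) : String :=
  let cur := PySem.Str.upper (if current_source = "" then "MANUAL" else current_source)
  let pset : PySem.Set String :=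
    PySem.Set.ofList ((payload_sources.filter (fun s => s ≠ "")).map PySem.Str.upper)
  if pset = [] then cur
  else if cur = "MANUAL" ∨ cur = "IMPORT" then
    (if PySem.Set.len pset > 1 then "MIXED" else pset.headD "")
  else if PySem.Set.contains pset cur then
    (if PySem.Set.len pset > 1 then "MIXED" else cur)
  else "MIXED"

-- ===== PORT B =====
-- The for-loop of Source B with its (acc, found) state; Python's final 'return acc if found else cur'
-- is ported as 'acc.getD cur' (when found is true, acc is always some, so the default is never used).
def mergeLoop (cur : String) : List String → Option String → Bool → String
  | [], acc, found => if found then acc.getD cur else cur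
  | s :: rest, acc, found =>
    if s = "" then mergeLoop cur rest acc found
    else
      match acc with
      | none => mergeLoop cur rest (some (PySem.Str.upper s)) true
      | some a => if PySem.Str.upper s ≠ a then "MIXED" else mergeLoop cur rest (some a) true

def merge_source_api_py_alt (current_source : String) (payload_sources : List String) : String :=
  let cur := PySem.Str.upper (if current_source = "" then "MANUAL" else current_source)
  mergeLoop cur payload_sources
    (if cur = "MANUAL" ∨ cur = "IMPORT" then none else some cur) false

-- ===== PRECONDITION & SPEC =====
def Spec_merge_source_api_py (current_source : String) (payload_sources : List String) (out : String) : Prop := out = merge_source_api_py_alt current_source payload_sources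
instance (current_source : String) (payload_sources : List String) (out : String) : Decidable (Spec_merge_source_api_py current_source payload_sources out) := by unfold Spec_merge_source_api_py; infer_instance

-- ===== CLAIM =====
def Claim_equal_merge_source_api_py : Prop := ∀ (current_source : String) (payload_sources : List String), Dom_merge_source_api_py current_source payload_sources → Spec_merge_source_api_py current_source payload_sources (merge_source_api_py current_source payload_sources)

-- ===== LEMMAS AND PROOFS =====

-- the list of uppercased non-empty payload entries, in order
def pvU (l : List String) : List String :=
  (l.filter (fun s => s ≠ "")).map PySem.Str.upper

lemma pvU_nil : pvU [] = [] := rfl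

lemma pvU_cons (s : String) (l : List String) :
    pvU (s :: l) = if s = "" then pvU l else PySem.Str.upper s :: pvU l := by
  by_cases h : s = "" <;> simp [pvU, h]

-- characterization of the loop from the state (some a, true)
lemma loop_some_true (cur a : String) (l : List String) :
    mergeLoop cur l (some a) true =
      if (pvU l).all (fun u => u == a) then a else "MIXED" := by
  induction l with
  | nil => simp [mergeLoop, pvU_nil]
  | cons s rest ih =>
    by_cases hs : s = ""
    · simp [mergeLoop, hs, pvU_cons, ih]
    · by_cases hu : PySem.Str.upper s = a
      · simp [mergeLoop, hs, hu, pvU_cons, ih]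
      · simp [mergeLoop, hs, hu, pvU_cons]

-- characterization of the loop from the state (some a, false)
lemma loop_some_false (cur a : String) (l : List String) :
    mergeLoop cur l (some a) false =
      if pvU l = [] then cur
      else if (pvU l).all (fun u => u == a) then a else "MIXED" := by
  induction l with
  | nil => simp [mergeLoop, pvU_nil]
  | cons s rest ih =>
    by_cases hs : s = ""
    · simp [mergeLoop, hs, pvU_cons, ih]
    · by_cases hu : PySem.Str.upper s = a
      · simp [mergeLoop, hs, hu, pvU_cons, loop_some_true]
      · simp [mergeLoop, hs, hu, pvU_cons]

-- characterization of the loop from the state (none, false)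
lemma loop_none (cur : String) (l : List String) :
    mergeLoop cur l none false =
      match pvU l with
      | [] => cur
      | u :: us => if us.all (fun x => x == u) then u else "MIXED" := by
  induction l with
  | nil => simp [mergeLoop, pvU_nil]
  | cons s rest ih =>
    by_cases hs : s = ""
    · simp [mergeLoop, hs, pvU_cons, ih]
    · simp [mergeLoop, hs, pvU_cons, loop_some_true]

-- Set.add only ever appends
lemma foldl_add_append (xs : List String) :
    ∀ acc : List String, ∃ t, xs.foldl PySem.Set.add acc = acc ++ t := by
  induction xs with
  | nil => intro acc; exact ⟨[], by simp⟩
  | cons x xs ih =>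
    intro acc
    obtain ⟨t, ht⟩ := ih (PySem.Set.add acc x)
    by_cases h : x ∈ acc
    · exact ⟨t, by simpa [List.foldl, PySem.Set.add_of_mem h] using ht⟩
    · exact ⟨x :: t, by simpa [List.foldl, PySem.Set.add_of_not_mem h] using ht⟩

lemma foldl_add_const (u : String) (xs : List String) (h : ∀ x ∈ xs, x = u) :
    xs.foldl PySem.Set.add [u] = [u] := by
  induction xs with
  | nil => rfl
  | cons x xs ih =>
    have hx : x = u := h x (by simp)
    have : PySem.Set.add [u] x = [u] := by
      subst hx; exact PySem.Set.add_of_mem (by simp)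
    simp only [List.foldl, this]
    exact ih (fun y hy => h y (by simp [hy]))

lemma ofList_cons (u : String) (us : List String) :
    PySem.Set.ofList (u :: us) = us.foldl PySem.Set.add [u] := by
  simp [PySem.Set.ofList_eq_foldl, List.foldl, PySem.Set.add, PySem.Set.contains]

lemma ofList_singleton (u : String) (us : List String) (h : ∀ x ∈ us, x = u) :
    PySem.Set.ofList (u :: us) = [u] := by
  rw [ofList_cons]; exact foldl_add_const u us h

lemma ofList_len_gt (u : String) (us : List String) (h : ¬ ∀ x ∈ us, x = u) :
    1 < (PySem.Set.ofList (u :: us)).length := by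
  obtain ⟨t, ht⟩ := foldl_add_append us [u]
  rw [ofList_cons] at *
  rcases t with _ | ⟨y, t⟩
  · exfalso
    apply h
    intro x hx
    have hmem : x ∈ PySem.Set.ofList (u :: us) := by
      rw [PySem.Set.mem_ofList]; simp [hx]
    rw [ofList_cons, ht] at hmem
    simpa using hmem
  · rw [ht]; simp

-- the core equivalence for a fixed merged current label
lemma core (cur : String) (l : List String) :
    (if PySem.Set.ofList (pvU l) = [] then cur
     else if cur = "MANUAL" ∨ cur = "IMPORT" then
       (if PySem.Set.len (PySem.Set.ofList (pvU l)) > 1 then "MIXED"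
        else (PySem.Set.ofList (pvU l)).headD "")
     else if PySem.Set.contains (PySem.Set.ofList (pvU l)) cur then
       (if PySem.Set.len (PySem.Set.ofList (pvU l)) > 1 then "MIXED" else cur)
     else "MIXED")
    = mergeLoop cur l (if cur = "MANUAL" ∨ cur = "IMPORT" then none else some cur) false := by
  cases hU : pvU l with
  | nil =>
    by_cases hms : cur = "MANUAL" ∨ cur = "IMPORT"
    · conv_rhs => rw [if_pos hms, loop_none, hU]
      simp [PySem.Set.ofList]
    · conv_rhs => rw [if_neg hms, loop_some_false, hU]
      simp [PySem.Set.ofList]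
  | cons u us =>
    by_cases hall : ∀ x ∈ us, x = u
    · have hone : PySem.Set.ofList (u :: us) = [u] := ofList_singleton u us hall
      by_cases hms : cur = "MANUAL" ∨ cur = "IMPORT"
      · conv_rhs => rw [if_pos hms, loop_none, hU]
        rw [hone]
        simp [hms, PySem.Set.len, List.all_eq_true]
        exact fun x hx hne => absurd (hall x hx) hne
      · conv_rhs => rw [if_neg hms, loop_some_false, hU]
        rw [hone]
        by_cases hc : cur = u
        · simp [hc, PySem.Set.len, PySem.Set.contains, List.all_eq_true]
          exact fun x hx hne => absurd (hall x hx) hne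
        · have huc : (u == cur) = false := by
            simp only [beq_eq_false_iff_ne, ne_eq]
            exact fun h => hc h.symm
          simp [hms, PySem.Set.contains, List.all_cons, huc]
          exact fun h => absurd h hc
    · have hlen := ofList_len_gt u us hall
      have hne : PySem.Set.ofList (u :: us) ≠ [] := by
        intro h; rw [h] at hlen; simp at hlen
      have hfalse : ¬ (us.all (fun x => x == u)) = true := by
        simpa [List.all_eq_true] using hall
      by_cases hms : cur = "MANUAL" ∨ cur = "IMPORT"
      · conv_rhs => rw [if_pos hms, loop_none, hU]
        simp [hne, PySem.Set.len, hlen, hfalse]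
      · conv_rhs => rw [if_neg hms, loop_some_false, hU]
        have hnc : ¬ ((u :: us).all (fun x => x == cur) = true) := by
          intro h
          rw [List.all_eq_true] at h
          have hu : u = cur := by simpa using h u (by simp)
          exact hall (fun x hx => ((by simpa using h x (by simp [hx])) : x = cur).trans hu.symm)
        by_cases hc : PySem.Set.contains (PySem.Set.ofList (u :: us)) cur <;>
          simp [hne, PySem.Set.len, hlen, hnc]

theorem merge_source_api_py_spec : Claim_equal_merge_source_api_py := by
  intro cs ps _
  unfold Spec_merge_source_api_py merge_source_api_py merge_source_api_py_alt
  exact core _ ps
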